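-- pv_equiv track=rewrite | github.com/rebeccaamador/topic-sync-automation | scripts/step3_dbt_realtime_sink.py | detect_array_field
-- ===== SOURCE A (Python) =====
-- def detect_array_field(field_types):
--     """
--     Detect if there's an array/list field in the schema that should be flattened.
--
--     Returns:
--         Tuple of (array_field_name, has_array) or (None, False)
--     """
--     if not field_types:
--         return None, False
--
--     # Common array field names to check first
--     priority_arrays = ['applications', 'events', 'items', 'records', 'data', 'results']
--
--     # Check priority arrays first
--     for field_name in priority_arrays:
--         if field_name in field_types and 'list' in field_types[field_name]:
--             return field_name, True
--
--     # Check any field with list type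
--     for field_name, types in field_types.items():
--         if 'list' in types:
--             return field_name, True
--
--     return None, False
-- ===== SOURCE B (Python) =====
-- def detect_array_field(field_types):
--     """Single pass over the schema: keep the best-ranked priority list field and
--     the first list field seen, then pick the priority match if any."""
--     if not field_types:
--         return None, False
--
--     priority_index = {name: i for i, name in enumerate(
--         ['applications', 'events', 'items', 'records', 'data', 'results'])}
--
--     best = None        # (rank, name) of the best priority list field so far
--     first_list = None  # first field (in dict order) whose type mentions 'list'
--     for name, types in field_types.items():
--         if 'list' in types:
--             if first_list is None:
--                 first_list = name
--             r = priority_index.get(name)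
--             if r is not None and (best is None or r < best[0]):
--                 best = (r, name)
--
--     if best is not None:
--         return best[1], True
--     if first_list is not None:
--         return first_list, True
--     return None, False
-- ===== Notes on version B (the rewrite author's own statement) =====
-- stated objective: alternative
-- what changed: Replaces A's two scans (six dict lookups over a priority list, then a scan of the dict) by one pass over field_types.items() that tracks the minimum-priority-index match and the first list field, combined after the loop.
import Mathlib
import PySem

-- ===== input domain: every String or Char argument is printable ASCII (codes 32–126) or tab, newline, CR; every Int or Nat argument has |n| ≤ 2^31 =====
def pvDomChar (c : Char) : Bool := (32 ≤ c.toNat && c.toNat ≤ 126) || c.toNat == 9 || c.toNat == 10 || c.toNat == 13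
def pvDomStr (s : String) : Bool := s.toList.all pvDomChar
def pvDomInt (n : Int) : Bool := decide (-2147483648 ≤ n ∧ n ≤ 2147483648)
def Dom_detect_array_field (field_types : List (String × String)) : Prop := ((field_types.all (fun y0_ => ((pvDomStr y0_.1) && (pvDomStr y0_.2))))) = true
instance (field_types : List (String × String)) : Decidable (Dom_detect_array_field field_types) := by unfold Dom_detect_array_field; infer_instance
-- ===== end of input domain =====

-- B replaces A's two scans by one pass over the items; the return values are proved equal on dicts (no duplicate keys).

-- shared elementary helper: the test `'list' in types`
def pvC (t : String) : Bool := PySem.Str.isIn "list" t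

-- ===== PORT A =====
-- for field_name in priority_arrays: if field_name in field_types and 'list' in field_types[field_name]: return field_name, True
def pvA_priorityLoop (d : PySem.Dict String String) : List String → Option String
  | [] => none
  | field_name :: rest =>
    match PySem.Dict.get? d field_name with
    | some t => if pvC t then some field_name else pvA_priorityLoop d rest
    | none => pvA_priorityLoop d rest

-- for field_name, types in field_types.items(): if 'list' in types: return field_name, True
def pvA_itemsLoop : List (String × String) → Option String
  | [] => none
  | (field_name, types) :: rest =>
    if pvC types then some field_name else pvA_itemsLoop rest

def detect_array_field (field_types : List (String × String)) : Option String × Bool :=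
  if field_types = [] then (none, false)
  else
    let priority_arrays := ["applications", "events", "items", "records", "data", "results"]
    match pvA_priorityLoop (PySem.Dict.mk field_types) priority_arrays with
    | some field_name => (some field_name, true)
    | none =>
      match pvA_itemsLoop field_types with
      | some field_name => (some field_name, true)
      | none => (none, false)

-- ===== PORT B =====
def pvB_priority_index : PySem.Dict String Int :=
  PySem.Dict.mk [("applications", 0), ("events", 1), ("items", 2), ("records", 3), ("data", 4), ("results", 5)]

-- priority_index.get(name)
def pvRank? (n : String) : Option Int := PySem.Dict.get? pvB_priority_index n

-- one loop body of B: update (best, first_list) with the item (name, types)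
def pvB_step (st : Option (Int × String) × Option String) (p : String × String) :
    Option (Int × String) × Option String :=
  if pvC p.2 then
    let first := match st.2 with | none => some p.1 | some f => some f
    let best :=
      match pvRank? p.1 with
      | some r =>
        match st.1 with
        | none => some (r, p.1)
        | some b => if r < b.1 then some (r, p.1) else some b
      | none => st.1
    (best, first)
  else st

def detect_array_field_alt (field_types : List (String × String)) : Option String × Bool :=
  if field_types = [] then (none, false)
  else
    let st := field_types.foldl pvB_step (none, none)
    match st.1 with
    | some b => (some b.2, true)
    | none =>
      match st.2 with
      | some f => (some f, true)
      | none => (none, false)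

-- ===== PRECONDITION & SPEC =====
-- Pre_ excludes association lists with duplicate keys: a Python dict (A's actual argument type)
-- cannot contain them; they arise only from the dict -> association-list convention, and which
-- duplicate each program's scan picks up is accidental on both sides.
def Pre_detect_array_field (field_types : List (String × String)) : Prop :=
  (field_types.map Prod.fst).Nodup
instance (field_types : List (String × String)) : Decidable (Pre_detect_array_field field_types) := by
  unfold Pre_detect_array_field; infer_instance

def pvWitness_detect_array_field : (List (String × String)) :=
  [("name", "str"), ("events", "list[str]"), ("data", "list")]

def Spec_detect_array_field (field_types : List (String × String)) (out : Option String × Bool) : Prop := out = detect_array_field_alt field_types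
instance (field_types : List (String × String)) (out : Option String × Bool) : Decidable (Spec_detect_array_field field_types out) := by unfold Spec_detect_array_field; infer_instance

-- ===== CLAIM (what is proved, stated in full; the proofs are below) =====
def Claim_equal_detect_array_field : Prop := ∀ (field_types : List (String × String)), Dom_detect_array_field field_types → Pre_detect_array_field field_types → Spec_detect_array_field field_types (detect_array_field field_types)

-- ===== LEMMAS AND PROOFS =====

-- the best-so-far component of B's fold, in isolation
def pvBStep (b : Option (Int × String)) (p : String × String) : Option (Int × String) :=
  if pvC p.2 then
    match pvRank? p.1 with
    | some r =>
      match b with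
      | none => some (r, p.1)
      | some q => if r < q.1 then some (r, p.1) else some q
    | none => b
  else b

-- the predicate A's priority loop tests
def pvPredA (d : PySem.Dict String String) (n : String) : Bool :=
  match PySem.Dict.get? d n with
  | some t => pvC t
  | none => false

theorem pvFold_fst (l : List (String × String)) :
    ∀ st : Option (Int × String) × Option String,
      (l.foldl pvB_step st).1 = l.foldl pvBStep st.1 := by
  induction l with
  | nil => intro st; rfl
  | cons p l ih =>
    intro st
    simp only [List.foldl_cons]
    rw [ih]
    have hstep : (pvB_step st p).1 = pvBStep st.1 p := by
      unfold pvB_step pvBStep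
      by_cases h : pvC p.2 = true <;> simp only [h, if_pos, if_neg, Bool.false_eq_true,
        not_false_iff, ite_true, ite_false]
    rw [hstep]

theorem pvFold_snd (l : List (String × String)) :
    ∀ st : Option (Int × String) × Option String,
      (l.foldl pvB_step st).2 =
        match st.2 with
        | some f => some f
        | none => (l.find? (fun p => pvC p.2)).map Prod.fst := by
  induction l with
  | nil => intro st; cases h : st.2 <;> simp [h]
  | cons p l ih =>
    intro st
    simp only [List.foldl_cons]
    rw [ih]
    by_cases h : pvC p.2 = true
    · have hstep : (pvB_step st p).2 = match st.2 with
        | none => some p.1 | some f => some f := by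
        unfold pvB_step; simp [h]
      rw [hstep, List.find?_cons]
      cases hs : st.2 <;> simp [h]
    · have hstep : (pvB_step st p).2 = st.2 := by unfold pvB_step; simp [h]
      rw [hstep, List.find?_cons]
      cases hs : st.2 <;> simp [h]

theorem pvBFold_none (l : List (String × String)) :
    ∀ b, l.foldl pvBStep b = none ↔
      (b = none ∧ ∀ p ∈ l, pvC p.2 = true → pvRank? p.1 = none) := by
  induction l with
  | nil => intro b; simp
  | cons p l ih =>
    intro b
    simp only [List.foldl_cons]
    rw [ih]
    constructor
    · rintro ⟨hb, hrest⟩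
      unfold pvBStep at hb
      by_cases hc : pvC p.2 = true
      · simp only [hc, ite_true] at hb
        cases hr : pvRank? p.1 with
        | none =>
          rw [hr] at hb
          refine ⟨hb, ?_⟩
          intro q hq hcq
          rcases List.mem_cons.mp hq with rfl | hq'
          · exact hr
          · exact hrest q hq' hcq
        | some r => rw [hr] at hb; cases b <;> simp at hb <;> split at hb <;> simp_all
      · simp only [hc, Bool.false_eq_true, ite_false] at hb
        refine ⟨hb, ?_⟩
        intro q hq hcq
        rcases List.mem_cons.mp hq with rfl | hq'
        · exact absurd hcq (by simp_all)
        · exact hrest q hq' hcq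
    · rintro ⟨rfl, hall⟩
      have hstep : pvBStep none p = none := by
        unfold pvBStep
        by_cases hc : pvC p.2 = true
        · have := hall p (by simp) hc; simp [hc, this]
        · simp [hc]
      rw [hstep]
      exact ⟨rfl, fun q hq => hall q (by simp [hq])⟩


-- equations for the isolated step
theorem pvBStep_not (b : Option (Int × String)) (p : String × String)
    (h : pvC p.2 = false) : pvBStep b p = b := by
  unfold pvBStep; simp [h]

theorem pvBStep_norank (b : Option (Int × String)) (p : String × String)
    (hc : pvC p.2 = true) (hr : pvRank? p.1 = none) : pvBStep b p = b := by
  unfold pvBStep; simp [hc, hr]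

theorem pvBStep_rank_none (p : String × String) (r : Int)
    (hc : pvC p.2 = true) (hr : pvRank? p.1 = some r) : pvBStep none p = some (r, p.1) := by
  unfold pvBStep; simp [hc, hr]

theorem pvBStep_rank_some (p : String × String) (r : Int) (q : Int × String)
    (hc : pvC p.2 = true) (hr : pvRank? p.1 = some r) :
    pvBStep (some q) p = if r < q.1 then some (r, p.1) else some q := by
  unfold pvBStep; simp [hc, hr]

-- well-formedness of the accumulator: its name really has its rank
def pvWF (b : Option (Int × String)) : Prop :=
  ∀ rn : Int × String, b = some rn → pvRank? rn.2 = some rn.1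

theorem pvBFold_some (l : List (String × String)) :
    ∀ b, pvWF b → ∀ r n, l.foldl pvBStep b = some (r, n) →
      pvRank? n = some r ∧
      (b = some (r, n) ∨ ∃ t, (n, t) ∈ l ∧ pvC t = true) ∧
      (∀ p ∈ l, pvC p.2 = true → ∀ r', pvRank? p.1 = some r' → r ≤ r') ∧
      (∀ rn : Int × String, b = some rn → r ≤ rn.1) := by
  induction l with
  | nil =>
    intro b hwf r n h
    simp at h
    refine ⟨by simpa using hwf (r, n) h, Or.inl h, by simp, ?_⟩
    intro rn hrn
    rw [h, Option.some.injEq] at hrn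
    subst hrn
    simp
  | cons p l ih =>
    intro b hwf r n h
    simp only [List.foldl_cons] at h
    by_cases hc : pvC p.2 = true
    case neg =>
      rw [pvBStep_not b p (by simpa using hc)] at h
      obtain ⟨h1, h2, h3, h4⟩ := ih b hwf r n h
      refine ⟨h1, ?_, ?_, h4⟩
      · rcases h2 with h2 | ⟨t, ht, hctt⟩
        · exact Or.inl h2
        · exact Or.inr ⟨t, List.mem_cons_of_mem _ ht, hctt⟩
      · intro q hq hcq r' hr'
        rcases List.mem_cons.mp hq with rfl | hq'
        · exact absurd hcq (by simpa using hc)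
        · exact h3 q hq' hcq r' hr'
    case pos =>
      cases hr : pvRank? p.1 with
      | none =>
        rw [pvBStep_norank b p hc hr] at h
        obtain ⟨h1, h2, h3, h4⟩ := ih b hwf r n h
        refine ⟨h1, ?_, ?_, h4⟩
        · rcases h2 with h2 | ⟨t, ht, hctt⟩
          · exact Or.inl h2
          · exact Or.inr ⟨t, List.mem_cons_of_mem _ ht, hctt⟩
        · intro q hq hcq r' hr'
          rcases List.mem_cons.mp hq with rfl | hq'
          · rw [hr] at hr'; cases hr'
          · exact h3 q hq' hcq r' hr'
      | some rr =>
        obtain ⟨rs, ns, hs, hwfr, hle_rr, hfrom, hle_b⟩ :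
            ∃ rs ns, pvBStep b p = some (rs, ns) ∧ pvRank? ns = some rs ∧ rs ≤ rr ∧
              (b = some (rs, ns) ∨ ns = p.1) ∧ (∀ q' : Int × String, b = some q' → rs ≤ q'.1) := by
          cases b with
          | none =>
            exact ⟨rr, p.1, pvBStep_rank_none p rr hc hr, by simpa using hr, le_refl _,
              Or.inr rfl, by intro q' hq'; cases hq'⟩
          | some q =>
            rw [pvBStep_rank_some p rr q hc hr]
            by_cases hlt : rr < q.1
            · refine ⟨rr, p.1, by simp [hlt], by simpa using hr, le_refl _, Or.inr rfl, ?_⟩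
              intro q' hq'
              rw [Option.some.injEq] at hq'
              subst hq'
              omega
            · refine ⟨q.1, q.2, by simp [hlt], by simpa using hwf q rfl, by omega, Or.inl (by simp), ?_⟩
              intro q' hq'
              rw [Option.some.injEq] at hq'
              subst hq'
              simp
        have hwf' : pvWF (pvBStep b p) := by
          intro rn hrn
          rw [hs, Option.some.injEq] at hrn
          subst hrn
          simpa using hwfr
        obtain ⟨h1, h2, h3, h4⟩ := ih (pvBStep b p) hwf' r n h
        have hle_rs : r ≤ rs := h4 (rs, ns) hs
        refine ⟨h1, ?_, ?_, ?_⟩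
        · rcases h2 with h2 | ⟨t, ht, hctt⟩
          · rw [hs, Option.some.injEq, Prod.mk.injEq] at h2
            obtain ⟨h2a, h2b⟩ := h2
            rcases hfrom with hb | hp1
            · exact Or.inl (by rw [hb, h2a, h2b])
            · refine Or.inr ⟨p.2, ?_, hc⟩
              rw [← h2b, hp1]
              simp
          · exact Or.inr ⟨t, List.mem_cons_of_mem _ ht, hctt⟩
        · intro q hq hcq r' hr'
          rcases List.mem_cons.mp hq with rfl | hq'
          · rw [hr, Option.some.injEq] at hr'
            subst hr'
            omega
          · exact h3 q hq' hcq r' hr'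
        · intro rn hrn
          exact le_trans hle_rs (hle_b rn hrn)

-- A's first loop, one step at a time
theorem pvA_priorityLoop_cons (d : PySem.Dict String String) (n : String) (ps : List String) :
    pvA_priorityLoop d (n :: ps) = if pvPredA d n = true then some n else pvA_priorityLoop d ps := by
  have h0 : pvA_priorityLoop d (n :: ps) =
      (match PySem.Dict.get? d n with
       | some t => if pvC t = true then some n else pvA_priorityLoop d ps
       | none => pvA_priorityLoop d ps) := rfl
  rw [h0]
  unfold pvPredA
  cases hg : PySem.Dict.get? d n with
  | none => simp [hg]
  | some t => by_cases hc : pvC t = true <;> simp [hg, hc]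

-- A's first loop is a find? over the priority names
theorem pvA_priorityLoop_eq_find? (d : PySem.Dict String String) (ps : List String) :
    pvA_priorityLoop d ps = ps.find? (pvPredA d) := by
  induction ps with
  | nil => rfl
  | cons n ps ih =>
    rw [pvA_priorityLoop_cons, List.find?_cons]
    cases hp : pvPredA d n <;> simp [hp, ih]

-- A's second loop is a find? over the items
theorem pvA_itemsLoop_eq_find? (l : List (String × String)) :
    pvA_itemsLoop l = (l.find? (fun p => pvC p.2)).map Prod.fst := by
  induction l with
  | nil => rfl
  | cons p l ih =>
    obtain ⟨n, t⟩ := p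
    unfold pvA_itemsLoop
    rw [List.find?_cons]
    by_cases hc : pvC t = true
    · simp [hc]
    · simp [hc, ih]

-- lookup success gives membership
theorem pvGet?_mk_mem (l : List (String × String)) (n : String) (t : String)
    (h : PySem.Dict.get? (PySem.Dict.mk l) n = some t) : (n, t) ∈ l := by
  induction l with
  | nil => simp [PySem.Dict.get?] at h
  | cons p l ih =>
    obtain ⟨k, v⟩ := p
    rw [PySem.Dict.get?_mk_cons] at h
    by_cases hk : (k == n) = true
    · simp [hk] at h; simp_all
    · simp [hk] at h; exact List.mem_cons_of_mem _ (ih h)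

-- membership gives lookup, given nodup keys
theorem pvMem_get?_mk (l : List (String × String)) (n : String) (t : String)
    (hnd : (l.map Prod.fst).Nodup) (h : (n, t) ∈ l) :
    PySem.Dict.get? (PySem.Dict.mk l) n = some t := by
  induction l with
  | nil => simp at h
  | cons p l ih =>
    obtain ⟨k, v⟩ := p
    simp only [List.map_cons, List.nodup_cons] at hnd
    rw [PySem.Dict.get?_mk_cons]
    rcases List.mem_cons.mp h with h' | h'
    · rw [Prod.mk.injEq] at h'
      simp [h'.1, h'.2]
    · have hne : ¬((k == n) = true) := by
        simp only [beq_iff_eq]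
        intro hkn
        exact hnd.1 (by rw [hkn]; exact List.mem_map_of_mem h')
      simp only [hne, Bool.false_eq_true, ite_false]
      exact ih hnd.2 h'

-- the priority predicate is false on names of rank below the fold's minimum
theorem pvPredA_false (l : List (String × String)) (r : Int)
    (hmin : ∀ p ∈ l, pvC p.2 = true → ∀ r', pvRank? p.1 = some r' → r ≤ r')
    (m : String) (i : Int) (hm : pvRank? m = some i) (hir : i < r) :
    pvPredA (PySem.Dict.mk l) m = false := by
  unfold pvPredA
  cases hg : PySem.Dict.get? (PySem.Dict.mk l) m with
  | none => rfl
  | some t =>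
    by_cases hc : pvC t = true
    · exact absurd (hmin (m, t) (pvGet?_mk_mem l m t hg) hc i hm) (by omega)
    · simpa using hc

-- ===== VERDICT (by name: the statement is the Claim_ definition above) =====
theorem detect_array_field_spec : Claim_equal_detect_array_field := by
  intro l _ hnd
  unfold Spec_detect_array_field detect_array_field detect_array_field_alt
  by_cases hl : l = []
  · simp [hl]
  · simp only [hl, ite_false]
    rw [pvA_priorityLoop_eq_find?, pvA_itemsLoop_eq_find?]
    have hfst : (l.foldl pvB_step (none, none)).1 = l.foldl pvBStep none := by
      simpa using pvFold_fst l (none, none)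
    have hsnd : (l.foldl pvB_step (none, none)).2 = (l.find? (fun p => pvC p.2)).map Prod.fst := by
      simpa using pvFold_snd l (none, none)
    simp only [hfst, hsnd]
    cases hres : l.foldl pvBStep none with
    | none =>
      obtain ⟨-, hall⟩ := (pvBFold_none l none).mp hres
      have hloop1 : (["applications", "events", "items", "records", "data", "results"] : List String).find? (pvPredA (PySem.Dict.mk l)) = none := by
        apply List.find?_eq_none.mpr
        intro n hn
        have hrank : (pvRank? n).isSome := by
          fin_cases hn <;> decide
        unfold pvPredA
        cases hg : PySem.Dict.get? (PySem.Dict.mk l) n with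
        | none => simp
        | some t =>
          simp only [Bool.not_eq_true]
          by_cases hc : pvC t = true
          · have := hall (n, t) (pvGet?_mk_mem l n t hg) hc
            rw [this] at hrank; simp at hrank
          · simpa using hc
      rw [hloop1]
    | some b =>
      obtain ⟨r, n⟩ := b
      obtain ⟨hrank, hmem, hmin, -⟩ :=
        pvBFold_some l none (by intro rn hrn; simp at hrn) r n hres
      rcases hmem with hmem | ⟨t, htl, hct⟩
      · simp at hmem
      have hget : PySem.Dict.get? (PySem.Dict.mk l) n = some t := pvMem_get?_mk l n t hnd htl
      have hpredn : pvPredA (PySem.Dict.mk l) n = true := by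
        unfold pvPredA; rw [hget]; exact hct
      -- decode the rank into the six concrete cases
      have hrank' := hrank
      unfold pvRank? pvB_priority_index at hrank'
      rw [PySem.Dict.get?_mk_cons, PySem.Dict.get?_mk_cons, PySem.Dict.get?_mk_cons,
          PySem.Dict.get?_mk_cons, PySem.Dict.get?_mk_cons, PySem.Dict.get?_mk_cons] at hrank'
      have hfalse := pvPredA_false l r hmin
      split_ifs at hrank' with h1 h2 h3 h4 h5 h6
      · simp at h1 hrank'
        subst h1
        simp [List.find?_cons, hpredn]
      · simp at h2 hrank'
        subst h2 hrank'
        simp [List.find?_cons, hpredn,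
          hfalse "applications" 0 (by decide) (by omega)]
      · simp at h3 hrank'
        subst h3 hrank'
        simp [List.find?_cons, hpredn,
          hfalse "applications" 0 (by decide) (by omega),
          hfalse "events" 1 (by decide) (by omega)]
      · simp at h4 hrank'
        subst h4 hrank'
        simp [List.find?_cons, hpredn,
          hfalse "applications" 0 (by decide) (by omega),
          hfalse "events" 1 (by decide) (by omega),
          hfalse "items" 2 (by decide) (by omega)]
      · simp at h5 hrank'
        subst h5 hrank'
        simp [List.find?_cons, hpredn,
          hfalse "applications" 0 (by decide) (by omega),
          hfalse "events" 1 (by decide) (by omega),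
          hfalse "items" 2 (by decide) (by omega),
          hfalse "records" 3 (by decide) (by omega)]
      · simp at h6 hrank'
        subst h6 hrank'
        simp [List.find?_cons, hpredn,
          hfalse "applications" 0 (by decide) (by omega),
          hfalse "events" 1 (by decide) (by omega),
          hfalse "items" 2 (by decide) (by omega),
          hfalse "records" 3 (by decide) (by omega),
          hfalse "data" 4 (by decide) (by omega)]
      · rw [show PySem.Dict.get? (PySem.Dict.mk ([] : List (String × Int))) n = none from rfl] at hrank'
        cases hrank'
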